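-- pv_equiv track=rewrite | github.com/rohitbishoyi10/Leetcode_dsa | move_negetive_to_left.py | mov_negative_to_left
-- ===== SOURCE A (Python) =====
-- def mov_negative_to_left(arr):
--     a = 0
--     for i in range(len(arr)):
--         if arr[i]<0:
--             num = arr.pop(i)
--             arr.insert(a,num)
--             a+=1
--     return arr
-- ===== SOURCE B (Python) =====
-- def mov_negative_to_left(arr):
--     negatives = [x for x in arr if x < 0]
--     others = [x for x in arr if x >= 0]
--     return negatives + others
-- ===== Notes on version B (the rewrite author's own statement) =====
-- stated objective: simpler
-- what changed: Replaced the in-place pop/insert index loop by a single stable partition (collect negatives, then non-negatives, concatenate); A mutates its argument in place while B returns a new list (return values agree).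
import Mathlib
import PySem

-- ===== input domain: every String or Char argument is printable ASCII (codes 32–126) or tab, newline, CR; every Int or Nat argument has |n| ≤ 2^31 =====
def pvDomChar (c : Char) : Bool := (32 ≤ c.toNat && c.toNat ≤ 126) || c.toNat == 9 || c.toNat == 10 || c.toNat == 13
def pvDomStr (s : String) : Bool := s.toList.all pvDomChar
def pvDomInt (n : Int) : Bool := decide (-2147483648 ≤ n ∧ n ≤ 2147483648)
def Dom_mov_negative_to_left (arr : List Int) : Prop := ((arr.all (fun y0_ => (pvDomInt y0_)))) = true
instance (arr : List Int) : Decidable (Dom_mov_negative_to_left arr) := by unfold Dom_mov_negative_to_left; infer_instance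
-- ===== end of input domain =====

-- B replaces A's in-place pop/insert index loop by a plain stable partition (negatives,
-- then non-negatives, concatenated); A mutates its argument in place, B does not — the
-- equivalence proved here is about the RETURN value only.


-- ===== PORT A =====
-- one iteration of A's for-loop body: state = (current list, a)
def movStepA (s : List Int × Int) (i : Int) : List Int × Int :=
  match PySem.List.pyGet? s.1 i with
  | none => s            -- unreachable: the list keeps its length, so i stays in range
  | some v =>
    if v < 0 then
      match PySem.List.pop? s.1 i with
      | none => s        -- unreachable likewise
      | some (num, rest) => (PySem.List.insert rest s.2 num, s.2 + 1)
    else s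

def mov_negative_to_left (arr : List Int) : List Int :=
  ((PySem.List.pyRange 0 arr.length 1).foldl movStepA (arr, 0)).1

-- ===== PORT B =====
def mov_negative_to_left_alt (arr : List Int) : List Int :=
  arr.filter (fun x => decide (x < 0)) ++ arr.filter (fun x => decide (0 ≤ x))

-- ===== PRECONDITION & SPEC =====
def Spec_mov_negative_to_left (arr : List Int) (out : List Int) : Prop := out = mov_negative_to_left_alt arr
instance (arr : List Int) (out : List Int) : Decidable (Spec_mov_negative_to_left arr out) := by unfold Spec_mov_negative_to_left; infer_instance

-- ===== CLAIM (what is proved, stated in full; the proofs are below) =====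
def Claim_equal_mov_negative_to_left : Prop := ∀ (arr : List Int), Dom_mov_negative_to_left arr → Spec_mov_negative_to_left arr (mov_negative_to_left arr)

-- ===== LEMMAS AND PROOFS =====

theorem mov_filter_length (p : List Int) :
    (p.filter (fun x => decide (x < 0))).length + (p.filter (fun x => decide (0 ≤ x))).length = p.length := by
  induction p with
  | nil => simp
  | cons x xs ih =>
    by_cases h : x < 0
    · simp [h, not_le.mpr h]; omega
    · simp [h, not_lt.mp h]; omega

theorem mov_step (p s' : List Int) (x : Int) :
    movStepA
        (p.filter (fun x => decide (x < 0)) ++ p.filter (fun x => decide (0 ≤ x)) ++ (x :: s'),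
         ((p.filter (fun x => decide (x < 0))).length : Int)) ((p.length : Int))
    = ((p ++ [x]).filter (fun x => decide (x < 0)) ++ (p ++ [x]).filter (fun x => decide (0 ≤ x)) ++ s',
       (((p ++ [x]).filter (fun x => decide (x < 0))).length : Int)) := by
  set N := p.filter (fun x => decide (x < 0)) with hN
  set P := p.filter (fun x => decide (0 ≤ x)) with hP
  have hLlen : N.length + P.length = p.length := mov_filter_length p
  have hLcast : (( (N ++ P).length : Nat) : Int) = (p.length : Int) := by
    simp [List.length_append]; omega
  unfold movStepA
  rw [show ((N ++ P ++ (x :: s')) : List Int) = (N ++ P) ++ x :: s' from rfl]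
  rw [← hLcast, PySem.List.pyGet?_append_length]
  dsimp only
  by_cases hx : x < 0
  · have hlt : (N ++ P).length < ((N ++ P) ++ x :: s').length := by
      simp
    rw [if_pos hx, PySem.List.pop?_natCast _ _ hlt]
    have hget : ((N ++ P) ++ x :: s')[(N ++ P).length] = x := by
      simp
    have herase : ((N ++ P) ++ x :: s').eraseIdx (N ++ P).length = (N ++ P) ++ s' := by
      rw [List.eraseIdx_append_of_length_le (by simp)]
      simp
    simp only [hget, herase]
    have hNle : N.length ≤ ((N ++ P) ++ s').length := by simp
    rw [PySem.List.insert_natCast _ _ _ hNle]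
    have htake : ((N ++ P) ++ s').take N.length = N := by
      simp [List.append_assoc]
    have hdrop : ((N ++ P) ++ s').drop N.length = P ++ s' := by
      simp [List.append_assoc]
    rw [htake, hdrop]
    have hfn : (p ++ [x]).filter (fun x => decide (x < 0)) = N ++ [x] := by
      simp [hN, List.filter_append, hx]
    have hfp : (p ++ [x]).filter (fun x => decide (0 ≤ x)) = P := by
      simp [hP, List.filter_append, not_le.mpr hx]
    rw [hfn, hfp]
    apply Prod.ext <;> simp [List.append_assoc]
  · rw [if_neg hx]
    have hfn : (p ++ [x]).filter (fun x => decide (x < 0)) = N := by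
      simp [hN, List.filter_append, hx]
    have hfp : (p ++ [x]).filter (fun x => decide (0 ≤ x)) = P ++ [x] := by
      simp [hP, List.filter_append, not_lt.mp hx]
    rw [hfn, hfp]
    apply Prod.ext <;> simp [List.append_assoc]


-- loop invariant: after A's loop has consumed the prefix p (suffix s still to come), the
-- list is (negatives of p) ++ (non-negatives of p) ++ s and a = #(negatives of p)
theorem mov_loop_inv (s : List Int) : ∀ (p : List Int),
    (PySem.List.pyRange (p.length) (p.length + s.length) 1).foldl movStepA
      (p.filter (fun x => decide (x < 0)) ++ p.filter (fun x => decide (0 ≤ x)) ++ s,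
       ((p.filter (fun x => decide (x < 0))).length : Int))
    = ((p ++ s).filter (fun x => decide (x < 0)) ++ (p ++ s).filter (fun x => decide (0 ≤ x)),
       (((p ++ s).filter (fun x => decide (x < 0))).length : Int)) := by
  induction s with
  | nil => intro p; simp [PySem.List.pyRange_one_eq_nil]
  | cons x s' ih =>
    intro p
    have hlen : ((p.length : Int)) < (p.length : Int) + ((x :: s').length : Int) := by
      simp
    rw [PySem.List.pyRange_one_cons hlen]
    simp only [List.foldl_cons]
    rw [mov_step]
    have hih := ih (p ++ [x])
    simp only [List.length_append, List.length_cons, List.length_nil, List.append_assoc,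
      List.singleton_append] at hih ⊢
    push_cast at hih ⊢
    convert hih using 3
    · ring

theorem mov_main (arr : List Int) : mov_negative_to_left arr = mov_negative_to_left_alt arr := by
  have h := mov_loop_inv arr []
  simp only [List.filter_nil, List.nil_append, List.append_nil, List.length_nil,
    Nat.cast_zero, zero_add] at h
  unfold mov_negative_to_left mov_negative_to_left_alt
  rw [h]

-- ===== VERDICT (by name: the statement is the Claim_ definition above) =====
theorem mov_negative_to_left_spec : Claim_equal_mov_negative_to_left := by
  intro arr _
  unfold Spec_mov_negative_to_left
  exact mov_main arr
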